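-- pv_equiv track=rewrite | github.com/parthk2510/Surakshanetra | backend/services/temporal/temporal_comparator.py | _compute_node_stability
-- ===== SOURCE A (Python) =====
-- from typing import Dict, List, Any, Optional, Tuple, Set
--
-- def _compute_node_stability(
--
--     partition_t1: Dict[str, int],
--     partition_t2: Dict[str, int],
--     mapping_t1: Dict[int, int],
--     mapping_t2: Dict[int, int]
-- ) -> Tuple[int, int]:
--     """
--     Compute how many nodes stayed in "equivalent" communities.
--
--     Since community IDs may not be comparable across time, we use the
--     overlap matrix to find maximum-overlap correspondence.
--
--     Args:
--         partition_t1: Node -> community mapping at T1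
--         partition_t2: Node -> community mapping at T2
--         mapping_t1: Matrix index -> T1 community ID
--         mapping_t2: Matrix index -> T2 community ID
--
--     Returns:
--         Tuple of (nodes_unchanged, nodes_changed)
--     """
--     common_nodes = set(partition_t1.keys()) & set(partition_t2.keys())
--
--     if not common_nodes:
--         return 0, 0
--
--     # Build a simple stability measure:
--     # A node is "unchanged" if it's in the same set of nodes as before
--     # This is determined by checking if the majority of its T1 community
--     # members are also in its T2 community
--
--     # Group nodes by T1 community
--     t1_communities = {}
--     for node, comm in partition_t1.items():
--         if node in common_nodes:
--             t1_communities.setdefault(comm, set()).add(node)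
--
--     # Group nodes by T2 community
--     t2_communities = {}
--     for node, comm in partition_t2.items():
--         if node in common_nodes:
--             t2_communities.setdefault(comm, set()).add(node)
--
--     # Find best T2 match for each T1 community (maximum overlap)
--     t1_to_t2_best = {}
--     for t1_comm, t1_nodes in t1_communities.items():
--         best_overlap = 0
--         best_t2 = None
--         for t2_comm, t2_nodes in t2_communities.items():
--             overlap = len(t1_nodes & t2_nodes)
--             if overlap > best_overlap:
--                 best_overlap = overlap
--                 best_t2 = t2_comm
--         t1_to_t2_best[t1_comm] = best_t2
--
--     # Count nodes that stayed with their community's best match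
--     nodes_unchanged = 0
--     nodes_changed = 0
--
--     for node in common_nodes:
--         t1_comm = partition_t1[node]
--         t2_comm = partition_t2[node]
--         expected_t2 = t1_to_t2_best.get(t1_comm)
--
--         if expected_t2 is not None and t2_comm == expected_t2:
--             nodes_unchanged += 1
--         else:
--             nodes_changed += 1
--
--     return nodes_unchanged, nodes_changed
-- ===== SOURCE B (Python) =====
-- def _compute_node_stability(partition_t1, partition_t2, mapping_t1, mapping_t2):
--     # Single pass over partition_t2 tallying (t1_comm, t2_comm) co-occurrence
--     # counts, then one pass over the tallies picking, per t1 community, the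
--     # t2 community with the largest count (ties broken by earliest first
--     # occurrence of the t2 community among common nodes, i.e. A's scan order).
--     pair_counts = {}
--     t2_order = {}
--     n_common = 0
--     for node, c2 in partition_t2.items():
--         if node in partition_t1:
--             n_common += 1
--             if c2 not in t2_order:
--                 t2_order[c2] = len(t2_order)
--             key = (partition_t1[node], c2)
--             pair_counts[key] = pair_counts.get(key, 0) + 1
--     if n_common == 0:
--         return 0, 0
--     best = {}
--     for (c1, c2), cnt in pair_counts.items():
--         o = t2_order[c2]
--         cur = best.get(c1)
--         if cur is None or cnt > cur[0] or (cnt == cur[0] and o < cur[1]):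
--             best[c1] = (cnt, o, c2)
--     unchanged = 0
--     for node, c2 in partition_t2.items():
--         if node in partition_t1 and best[partition_t1[node]][2] == c2:
--             unchanged += 1
--     return unchanged, n_common - unchanged
-- ===== Notes on version B (the rewrite author's own statement) =====
-- stated objective: alternative
-- what changed: Replaces the grouping into per-community node sets and the nested best-overlap scan (every t1 community against every t2 community with a set intersection) by a single pass over partition_t2 that tallies (t1_comm,t2_comm) co-occurrence counts plus a first-occurrence order index, then one pass over the tallies picking the lexicographic (count, order) best per t1 community.
import Mathlib
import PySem

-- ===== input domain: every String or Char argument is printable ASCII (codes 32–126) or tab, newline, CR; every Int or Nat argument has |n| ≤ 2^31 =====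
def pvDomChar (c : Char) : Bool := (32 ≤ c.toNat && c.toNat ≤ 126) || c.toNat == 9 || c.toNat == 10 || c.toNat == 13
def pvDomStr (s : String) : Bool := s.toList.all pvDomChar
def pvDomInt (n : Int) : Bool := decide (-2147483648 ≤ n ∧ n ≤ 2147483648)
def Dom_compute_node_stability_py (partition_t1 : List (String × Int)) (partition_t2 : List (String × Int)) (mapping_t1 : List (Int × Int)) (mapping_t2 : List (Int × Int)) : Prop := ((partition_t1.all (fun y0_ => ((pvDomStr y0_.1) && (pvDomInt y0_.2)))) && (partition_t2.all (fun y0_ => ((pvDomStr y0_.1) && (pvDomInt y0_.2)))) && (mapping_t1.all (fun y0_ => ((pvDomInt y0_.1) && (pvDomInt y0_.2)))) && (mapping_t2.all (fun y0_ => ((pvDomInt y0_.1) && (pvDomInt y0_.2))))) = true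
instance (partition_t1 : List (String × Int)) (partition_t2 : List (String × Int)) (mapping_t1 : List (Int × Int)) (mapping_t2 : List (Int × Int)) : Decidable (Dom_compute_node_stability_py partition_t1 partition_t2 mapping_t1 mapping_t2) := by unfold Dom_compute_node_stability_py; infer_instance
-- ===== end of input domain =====

-- B replaces A's per-community node sets and nested best-overlap set-intersection scan by one
-- co-occurrence tally pass plus one pass over the tallies (objective: alternative algorithm).

-- ===== PORT A =====
-- A's `t1_communities`/`t2_communities` loop: group the common nodes of `items` by community
-- (`setdefault(comm, set()).add(node)` = modify with default empty set, add the node).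
def pvGroupA (common : PySem.Set String) (items : List (String × Int)) : PySem.Dict Int (PySem.Set String) :=
  items.foldl (fun d q =>
    if PySem.Set.contains common q.1 then d.modify q.2 PySem.Set.empty (fun s => PySem.Set.add s q.1) else d)
    PySem.Dict.empty

-- A's inner loop: best_overlap/best_t2 scan of t2_communities for one t1 community's node set.
def pvBestInnerA (t1_nodes : PySem.Set String) (t2_items : List (Int × PySem.Set String)) : Int × Option Int :=
  t2_items.foldl (fun st q2 =>
    let overlap := PySem.Set.len (PySem.Set.inter t1_nodes q2.2)
    if overlap > st.1 then (overlap, some q2.1) else st) (0, none)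

-- A's `t1_to_t2_best` loop.
def pvBestA (t1c t2c : PySem.Dict Int (PySem.Set String)) : PySem.Dict Int (Option Int) :=
  t1c.items.foldl (fun b q => b.insert q.1 (pvBestInnerA q.2 t2c.items).2) PySem.Dict.empty

def compute_node_stability_py (partition_t1 : List (String × Int)) (partition_t2 : List (String × Int)) (mapping_t1 : List (Int × Int)) (mapping_t2 : List (Int × Int)) : Int × Int :=
  let p1 : PySem.Dict String Int := PySem.Dict.ofList partition_t1
  let p2 : PySem.Dict String Int := PySem.Dict.ofList partition_t2
  let common : PySem.Set String := PySem.Set.inter (PySem.Set.ofList p1.keys) (PySem.Set.ofList p2.keys)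
  if common.isEmpty then (0, 0)
  else
    let t1c := pvGroupA common p1.items
    let t2c := pvGroupA common p2.items
    let best := pvBestA t1c t2c
    -- `for node in common_nodes`: a Python set iteration; the two counters do not depend on the order.
    -- `partition_t1[node]` / `partition_t2[node]`: node ∈ common ⊆ both key sets, so no KeyError; getD's default is never used.
    -- `expected_t2 is not None and t2_comm == expected_t2`  =  expected = some t2_comm.
    common.foldl (fun (uc : Int × Int) node =>
      let t1_comm := p1.getD node 0
      let t2_comm := p2.getD node 0
      let expected := (best.get? t1_comm).getD none
      if expected = some t2_comm then (uc.1 + 1, uc.2) else (uc.1, uc.2 + 1)) (0, 0)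

-- ===== PORT B =====
-- B's single tally pass over partition_t2.items(): (pair_counts, t2_order, n_common).
def pvTallyB (p1 : PySem.Dict String Int) (items : List (String × Int)) :
    PySem.Dict (Int × Int) Int × PySem.Dict Int Int × Int :=
  items.foldl (fun st q =>
    if p1.contains q.1 then
      (st.1.insert (p1.getD q.1 0, q.2) (st.1.getD (p1.getD q.1 0, q.2) 0 + 1),
       st.2.1.setdefault q.2 (st.2.1.size : Int),
       st.2.2 + 1)
    else st) (PySem.Dict.empty, PySem.Dict.empty, 0)

-- B's pass over the tallies: per t1 community keep (count, order, t2_comm), replacing on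
-- strictly larger count or equal count with strictly smaller first-occurrence order.
def pvBestB (t2_order : PySem.Dict Int Int) (tallies : List ((Int × Int) × Int)) :
    PySem.Dict Int (Int × Int × Int) :=
  tallies.foldl (fun b q =>
    let o := t2_order.getD q.1.2 0   -- q.1.2 is a key of t2_order: no KeyError
    match b.get? q.1.1 with
    | none => b.insert q.1.1 (q.2, o, q.1.2)
    | some cur =>
      if q.2 > cur.1 ∨ (q.2 = cur.1 ∧ o < cur.2.1) then b.insert q.1.1 (q.2, o, q.1.2) else b)
    PySem.Dict.empty

def compute_node_stability_py_alt (partition_t1 : List (String × Int)) (partition_t2 : List (String × Int)) (mapping_t1 : List (Int × Int)) (mapping_t2 : List (Int × Int)) : Int × Int :=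
  let p1 : PySem.Dict String Int := PySem.Dict.ofList partition_t1
  let p2 : PySem.Dict String Int := PySem.Dict.ofList partition_t2
  let st := pvTallyB p1 p2.items
  if st.2.2 = 0 then (0, 0)
  else
    let best := pvBestB st.2.1 st.1.items
    -- `best[partition_t1[node]][2]`: the key is always present for a common node; getD's default is never used.
    let unchanged := p2.items.foldl (fun (u : Int) q =>
      if p1.contains q.1 ∧ (best.getD (p1.getD q.1 0) (0, 0, 0)).2.2 = q.2 then u + 1 else u) 0
    (unchanged, st.2.2 - unchanged)

-- ===== PRECONDITION & SPEC =====
def Spec_compute_node_stability_py (partition_t1 : List (String × Int)) (partition_t2 : List (String × Int)) (mapping_t1 : List (Int × Int)) (mapping_t2 : List (Int × Int)) (out : Int × Int) : Prop := out = compute_node_stability_py_alt partition_t1 partition_t2 mapping_t1 mapping_t2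
instance (partition_t1 : List (String × Int)) (partition_t2 : List (String × Int)) (mapping_t1 : List (Int × Int)) (mapping_t2 : List (Int × Int)) (out : Int × Int) : Decidable (Spec_compute_node_stability_py partition_t1 partition_t2 mapping_t1 mapping_t2 out) := by unfold Spec_compute_node_stability_py; infer_instance

-- ===== CLAIM (what is proved, stated in full; the proofs are below) =====
def Claim_equal_compute_node_stability_py : Prop := ∀ (partition_t1 : List (String × Int)) (partition_t2 : List (String × Int)) (mapping_t1 : List (Int × Int)) (mapping_t2 : List (Int × Int)), Dom_compute_node_stability_py partition_t1 partition_t2 mapping_t1 mapping_t2 → Spec_compute_node_stability_py partition_t1 partition_t2 mapping_t1 mapping_t2 (compute_node_stability_py partition_t1 partition_t2 mapping_t1 mapping_t2)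

-- ===== LEMMAS AND PROOFS =====

-- proof-side reference objects, over the two dicts
def pvCP (p1 p2 : PySem.Dict String Int) : List (String × Int) :=
  p2.items.filter (fun q => p1.contains q.1)
def pvPairs (p1 p2 : PySem.Dict String Int) : List (Int × Int) :=
  (pvCP p1 p2).map (fun q => (p1.getD q.1 0, q.2))
def pvW (p1 p2 : PySem.Dict String Int) (c1 c2 : Int) : Int :=
  ((pvPairs p1 p2).count (c1, c2) : Int)
def pvT2K (p1 p2 : PySem.Dict String Int) : PySem.Set Int :=
  PySem.Set.ofList ((pvCP p1 p2).map (·.2))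
def pvOrd (p1 p2 : PySem.Dict String Int) (c2 : Int) : Int :=
  (List.idxOf c2 (pvT2K p1 p2) : Int)
def pvRef (p1 p2 : PySem.Dict String Int) (c1 : Int) : Int × Option Int :=
  (pvT2K p1 p2).foldl (fun st c2 =>
    if pvW p1 p2 c1 c2 > st.1 then (pvW p1 p2 c1 c2, some c2) else st) (0, none)


-- shared helper objects for the proofs
def pvCommon (p1 p2 : PySem.Dict String Int) : PySem.Set String :=
  PySem.Set.inter (PySem.Set.ofList p1.keys) (PySem.Set.ofList p2.keys)
def pvCP1 (p1 p2 : PySem.Dict String Int) : List (String × Int) :=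
  p1.items.filter (fun q => PySem.Set.contains (pvCommon p1 p2) q.1)
def pvS1 (p1 p2 : PySem.Dict String Int) (c1 : Int) : List String :=
  ((pvCP1 p1 p2).filter (fun q => q.2 == c1)).map (·.1)
def pvS2 (p1 p2 : PySem.Dict String Int) (c2 : Int) : List String :=
  ((pvCP p1 p2).filter (fun q => q.2 == c2)).map (·.1)
def pvOrdD (p1 p2 : PySem.Dict String Int) : PySem.Dict Int Int :=
  ((pvCP p1 p2).map (·.2)).foldl (fun d x => d.setdefault x (d.size : Int)) PySem.Dict.empty

lemma pv_mem_keys {κ ν : Type} [BEq κ] (d : PySem.Dict κ ν) (k : κ) :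
    k ∈ d.keys ↔ ∃ v, (k, v) ∈ d.items := by
  simp only [PySem.Dict.keys, List.mem_map]
  constructor
  · rintro ⟨⟨a, b⟩, hm, rfl⟩; exact ⟨b, hm⟩
  · rintro ⟨v, hv⟩; exact ⟨(k, v), hv, rfl⟩

lemma pv_mem_common (p1 p2 : PySem.Dict String Int) (x : String) :
    x ∈ pvCommon p1 p2 ↔ x ∈ p1.keys ∧ x ∈ p2.keys := by
  simp [pvCommon, PySem.Set.mem_inter, PySem.Set.mem_ofList]

lemma pv_nodup_common (p1 p2 : PySem.Dict String Int) :
    (pvCommon p1 p2).Nodup :=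
  PySem.Set.nodup_inter _ _ (PySem.Set.nodup_ofList _)

lemma pv_snd_of_mem_items (p2 : PySem.Dict String Int) (hn2 : p2.keys.Nodup)
    {q : String × Int} (hq : q ∈ p2.items) : q.2 = p2.getD q.1 0 := by
  rcases q with ⟨k, v⟩
  exact (PySem.Dict.getD_of_mem_items p2 hq hn2 0).symm

lemma pv_mem_items_of_mem_keys (p : PySem.Dict String Int) (hn : p.keys.Nodup)
    {x : String} (hx : x ∈ p.keys) : (x, p.getD x 0) ∈ p.items := by
  rcases (pv_mem_keys p x).1 hx with ⟨v, hv⟩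
  have := PySem.Dict.getD_of_mem_items p hv hn 0
  rw [this]; exact hv

lemma pv_mem_cp (p1 p2 : PySem.Dict String Int) (q : String × Int) :
    q ∈ pvCP p1 p2 ↔ q ∈ p2.items ∧ q.1 ∈ p1.keys := by
  simp [pvCP, List.mem_filter, PySem.Dict.contains_iff_mem_keys]

lemma pv_nodup_cp_nodes (p1 p2 : PySem.Dict String Int) (hn2 : p2.keys.Nodup) :
    ((pvCP p1 p2).map (·.1)).Nodup := by
  have hs : ((pvCP p1 p2).map (·.1)).Sublist (p2.items.map (·.1)) :=
    List.Sublist.map _ List.filter_sublist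
  exact hn2.sublist hs

lemma pv_mem_cp_nodes (p1 p2 : PySem.Dict String Int) (x : String) :
    x ∈ (pvCP p1 p2).map (·.1) ↔ x ∈ pvCommon p1 p2 := by
  rw [pv_mem_common]
  constructor
  · rintro hm
    rcases List.mem_map.1 hm with ⟨q, hq, rfl⟩
    rcases (pv_mem_cp p1 p2 q).1 hq with ⟨h2, h1⟩
    refine ⟨h1, ?_⟩
    exact (pv_mem_keys p2 q.1).2 ⟨q.2, h2⟩
  · rintro ⟨h1, h2⟩
    rcases (pv_mem_keys p2 x).1 h2 with ⟨v, hv⟩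
    exact List.mem_map.2 ⟨(x, v), (pv_mem_cp p1 p2 (x, v)).2 ⟨hv, h1⟩, rfl⟩

lemma pv_perm_common_cp (p1 p2 : PySem.Dict String Int) (hn2 : p2.keys.Nodup) :
    (pvCommon p1 p2).Perm ((pvCP p1 p2).map (·.1)) := by
  rw [List.perm_ext_iff_of_nodup (pv_nodup_common p1 p2) (pv_nodup_cp_nodes p1 p2 hn2)]
  intro a; rw [pv_mem_cp_nodes]

lemma pv_common_nil_iff (p1 p2 : PySem.Dict String Int) (hn2 : p2.keys.Nodup) :
    pvCommon p1 p2 = [] ↔ pvCP p1 p2 = [] := by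
  have h := pv_perm_common_cp p1 p2 hn2
  constructor
  · intro h0; rw [h0] at h
    have := h.symm.length_eq
    simp at this
    exact List.eq_nil_of_length_eq_zero (by simpa using this)
  · intro h0
    have : (pvCommon p1 p2).length = 0 := by
      have := h.length_eq; rw [h0] at this; simpa using this
    exact List.eq_nil_of_length_eq_zero this


-- A's grouping fold, characterised: under distinct node names the accumulated sets are plain appends
lemma pv_groupA_getD_aux (l : List (String × Int)) (d : PySem.Dict Int (PySem.Set String))
    (hl : (l.map (·.1)).Nodup)
    (hd : ∀ c x, x ∈ d.getD c PySem.Set.empty → x ∉ l.map (·.1)) (c : Int) :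
    (l.foldl (fun d q => d.modify q.2 PySem.Set.empty (fun s => PySem.Set.add s q.1)) d).getD c PySem.Set.empty
      = d.getD c PySem.Set.empty ++ (l.filter (fun q => q.2 == c)).map (·.1) := by
  induction l generalizing d with
  | nil => simp
  | cons q t ih =>
    simp only [List.foldl_cons]
    have hq1 : q.1 ∉ t.map (·.1) := by
      have := hl; simp only [List.map_cons, List.nodup_cons] at this; exact this.1
    have hadd : ∀ c', (d.modify q.2 PySem.Set.empty (fun s => PySem.Set.add s q.1)).getD c' PySem.Set.empty
        = if c' = q.2 then d.getD q.2 PySem.Set.empty ++ [q.1] else d.getD c' PySem.Set.empty := by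
      intro c'
      rw [PySem.Dict.getD_modify]
      split_ifs with h
      · have : q.1 ∉ d.getD q.2 PySem.Set.empty := fun hx => hd q.2 q.1 hx (by simp)
        rw [PySem.Set.add_of_not_mem this]
      · rfl
    have hd' : ∀ c' x, x ∈ (d.modify q.2 PySem.Set.empty (fun s => PySem.Set.add s q.1)).getD c' PySem.Set.empty
        → x ∉ t.map (·.1) := by
      intro c' x hx hmem
      rw [hadd c'] at hx
      split_ifs at hx with h
      · rcases List.mem_append.1 hx with h1 | h1
        · exact hd q.2 x h1 (by simp; right; simpa using hmem)
        · simp at h1; subst h1; exact hq1 hmem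
      · exact hd c' x hx (by simp; right; simpa using hmem)
    rw [ih _ (by simpa using hl.sublist (by simp)) hd', hadd c]
    by_cases h : c = q.2
    · subst h
      simp
    · have hne : (q.2 == c) = false := by simpa using (Ne.symm h)
      simp [hne, h]

lemma pv_groupA_eq_filter (common : PySem.Set String) (l : List (String × Int)) :
    pvGroupA common l
      = (l.filter (fun q => PySem.Set.contains common q.1)).foldl
          (fun d q => d.modify q.2 PySem.Set.empty (fun s => PySem.Set.add s q.1)) PySem.Dict.empty := by
  rw [pvGroupA, List.foldl_filter]

lemma pv_cp2_eq (p1 p2 : PySem.Dict String Int) :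
    p2.items.filter (fun q => PySem.Set.contains (pvCommon p1 p2) q.1) = pvCP p1 p2 := by
  rw [pvCP]
  apply List.filter_congr
  intro q hq
  have hk : q.1 ∈ p2.keys := by
    simp only [PySem.Dict.keys]; exact List.mem_map.2 ⟨q, hq, rfl⟩
  by_cases h : q.1 ∈ p1.keys
  · have h1 : PySem.Set.contains (pvCommon p1 p2) q.1 = true := by
      rw [PySem.Set.contains_iff]; exact (pv_mem_common p1 p2 q.1).2 ⟨h, hk⟩
    have h2 : p1.contains q.1 = true := (PySem.Dict.contains_iff_mem_keys p1 q.1).2 h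
    rw [h1, h2]
  · have h1 : PySem.Set.contains (pvCommon p1 p2) q.1 = false := by
      rw [Bool.eq_false_iff]; intro hc
      exact h ((pv_mem_common p1 p2 q.1).1 ((PySem.Set.contains_iff _ _).1 hc)).1
    have h2 : p1.contains q.1 = false := by
      rw [Bool.eq_false_iff]; intro hc
      exact h ((PySem.Dict.contains_iff_mem_keys p1 q.1).1 hc)
    rw [h1, h2]

lemma pv_groupA2_getD (p1 p2 : PySem.Dict String Int) (hn2 : p2.keys.Nodup) (c2 : Int) :
    (pvGroupA (pvCommon p1 p2) p2.items).getD c2 PySem.Set.empty = pvS2 p1 p2 c2 := by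
  rw [pv_groupA_eq_filter, pv_cp2_eq, pvS2,
    pv_groupA_getD_aux _ _ (pv_nodup_cp_nodes p1 p2 hn2) (by intro c x hx; simp [PySem.Dict.getD_empty] at hx)]
  simp [PySem.Dict.getD_empty, PySem.Set.empty]

lemma pv_groupA1_getD (p1 p2 : PySem.Dict String Int) (hn1 : p1.keys.Nodup) (c1 : Int) :
    (pvGroupA (pvCommon p1 p2) p1.items).getD c1 PySem.Set.empty = pvS1 p1 p2 c1 := by
  rw [pv_groupA_eq_filter, pvS1, pvCP1,
    pv_groupA_getD_aux _ _ ?h1 (by intro c x hx; simp [PySem.Dict.getD_empty] at hx)]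
  · simp [PySem.Dict.getD_empty, PySem.Set.empty]
  case h1 =>
    exact hn1.sublist (List.Sublist.map _ List.filter_sublist)

lemma pv_keys_groupA (common : PySem.Set String) (l : List (String × Int)) :
    (pvGroupA common l).keys
      = PySem.Set.ofList ((l.filter (fun q => PySem.Set.contains common q.1)).map (·.2)) := by
  rw [pv_groupA_eq_filter, PySem.Dict.keys_foldl_modify_key]
  simp [PySem.Set.update_nil_left]

lemma pv_nodup_keys_groupA (common : PySem.Set String) (l : List (String × Int)) :
    (pvGroupA common l).keys.Nodup := by
  rw [pv_keys_groupA]; exact PySem.Set.nodup_ofList _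


lemma pv_mem_S2 (p1 p2 : PySem.Dict String Int) (hn2 : p2.keys.Nodup) (c2 : Int) (x : String) :
    x ∈ pvS2 p1 p2 c2 ↔ x ∈ pvCommon p1 p2 ∧ p2.getD x 0 = c2 := by
  rw [pvS2]
  constructor
  · intro hx
    rcases List.mem_map.1 hx with ⟨q, hq, rfl⟩
    rcases List.mem_filter.1 hq with ⟨hcp, hc⟩
    have h2 := (pv_mem_cp p1 p2 q).1 hcp
    refine ⟨(pv_mem_cp_nodes p1 p2 q.1).1 (List.mem_map.2 ⟨q, hcp, rfl⟩), ?_⟩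
    rw [← pv_snd_of_mem_items p2 hn2 h2.1]; simpa using hc
  · rintro ⟨hcom, hv⟩
    have hk := (pv_mem_common p1 p2 x).1 hcom
    have hit : (x, p2.getD x 0) ∈ p2.items := pv_mem_items_of_mem_keys p2 hn2 hk.2
    have hcp : (x, p2.getD x 0) ∈ pvCP p1 p2 := (pv_mem_cp p1 p2 _).2 ⟨hit, hk.1⟩
    exact List.mem_map.2 ⟨(x, p2.getD x 0), List.mem_filter.2 ⟨hcp, by simpa using hv⟩, rfl⟩

-- the overlap A computes with a set intersection is exactly the (c1,c2) co-occurrence count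
lemma pv_overlap (p1 p2 : PySem.Dict String Int) (hn1 : p1.keys.Nodup) (hn2 : p2.keys.Nodup)
    (c1 c2 : Int) :
    PySem.Set.len (PySem.Set.inter (pvS1 p1 p2 c1) (pvS2 p1 p2 c2)) = pvW p1 p2 c1 c2 := by
  rw [PySem.Set.len, pvW]
  congr 1
  -- both sides are countP over the common-node lists of the same node predicate
  have lhs : (PySem.Set.inter (pvS1 p1 p2 c1) (pvS2 p1 p2 c2)).length
      = List.countP (fun x => decide (p1.getD x 0 = c1 ∧ p2.getD x 0 = c2)) ((pvCP1 p1 p2).map (·.1)) := by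
    show (List.filter _ _).length = _
    rw [show ∀ (l : List String) (p : String → Bool), (l.filter p).length = l.countP p from fun l p => (List.countP_eq_length_filter (l := l) (p := p)).symm, pvS1, List.countP_map, List.countP_filter, List.countP_map]
    apply List.countP_congr
    intro q hq
    have hmem : q ∈ p1.items := (List.mem_filter.1 hq).1
    have hcom : q.1 ∈ pvCommon p1 p2 := by
      have := (List.mem_filter.1 hq).2; exact (PySem.Set.contains_iff _ _).1 this
    have hv1 : q.2 = p1.getD q.1 0 := pv_snd_of_mem_items p1 hn1 hmem
    simp only [Function.comp, PySem.Set.contains_eq_listContains, Bool.and_eq_true,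
      List.contains_iff_mem, beq_iff_eq, decide_eq_true_eq]
    rw [pv_mem_S2 p1 p2 hn2]
    constructor
    · rintro ⟨⟨_, h2⟩, hc⟩
      exact ⟨by rw [← hv1]; exact hc, h2⟩
    · rintro ⟨h1, h2⟩
      exact ⟨⟨hcom, h2⟩, by rw [hv1]; exact h1⟩
  have rhs : (pvPairs p1 p2).count (c1, c2)
      = List.countP (fun x => decide (p1.getD x 0 = c1 ∧ p2.getD x 0 = c2)) ((pvCP p1 p2).map (·.1)) := by
    rw [List.count_eq_countP, pvPairs, List.countP_map, List.countP_map]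
    apply List.countP_congr
    intro q hq
    have hmem : q ∈ p2.items := ((pv_mem_cp p1 p2 q).1 hq).1
    have hv2 : q.2 = p2.getD q.1 0 := pv_snd_of_mem_items p2 hn2 hmem
    simp only [Function.comp]
    constructor
    · intro h; simp at h ⊢; exact ⟨h.1, by rw [← hv2]; exact h.2⟩
    · intro h; simp at h ⊢; exact ⟨h.1, by rw [hv2]; exact h.2⟩
  rw [lhs, rhs]
  -- the two node lists are permutations of each other (both enumerate the common nodes, no duplicates)
  have hperm : ((pvCP1 p1 p2).map (·.1)).Perm ((pvCP p1 p2).map (·.1)) := by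
    have h1 : ((pvCP1 p1 p2).map (·.1)).Nodup :=
      hn1.sublist (List.Sublist.map _ List.filter_sublist)
    rw [List.perm_ext_iff_of_nodup h1 (pv_nodup_cp_nodes p1 p2 hn2)]
    intro a
    rw [pv_mem_cp_nodes]
    constructor
    · intro ha
      rcases List.mem_map.1 ha with ⟨q, hq, rfl⟩
      exact (PySem.Set.contains_iff _ _).1 (List.mem_filter.1 hq).2
    · intro ha
      have hk := (pv_mem_common p1 p2 a).1 ha
      have hit : (a, p1.getD a 0) ∈ p1.items := pv_mem_items_of_mem_keys p1 hn1 hk.1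
      refine List.mem_map.2 ⟨(a, p1.getD a 0), List.mem_filter.2 ⟨hit, ?_⟩, rfl⟩
      rw [PySem.Set.contains_iff]; exact ha
  exact hperm.countP_eq _


lemma pv_items_groupA2 (p1 p2 : PySem.Dict String Int) (hn2 : p2.keys.Nodup) :
    (pvGroupA (pvCommon p1 p2) p2.items).items
      = (pvT2K p1 p2).map (fun c => (c, pvS2 p1 p2 c)) := by
  rw [PySem.Dict.items_eq_map_keys _ (pv_nodup_keys_groupA _ _) PySem.Set.empty,
    pv_keys_groupA, pv_cp2_eq]
  rw [show PySem.Set.ofList ((pvCP p1 p2).map (·.2)) = pvT2K p1 p2 from rfl]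
  apply List.map_congr_left
  intro c _
  rw [pv_groupA2_getD p1 p2 hn2]

lemma pv_innerA (p1 p2 : PySem.Dict String Int) (hn1 : p1.keys.Nodup) (hn2 : p2.keys.Nodup)
    (c1 : Int) :
    pvBestInnerA (pvS1 p1 p2 c1) (pvGroupA (pvCommon p1 p2) p2.items).items = pvRef p1 p2 c1 := by
  rw [pvBestInnerA, pvRef, pv_items_groupA2 p1 p2 hn2, List.foldl_map]
  apply PySem.List.foldl_congr_mem
  intro acc c hc
  simp only
  rw [pv_overlap p1 p2 hn1 hn2 c1 c]

lemma pv_t1key_of_common (p1 p2 : PySem.Dict String Int) (hn1 : p1.keys.Nodup)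
    {x : String} (hx : x ∈ pvCommon p1 p2) :
    p1.getD x 0 ∈ (pvGroupA (pvCommon p1 p2) p1.items).keys := by
  rw [pv_keys_groupA, PySem.Set.mem_ofList]
  have hk := (pv_mem_common p1 p2 x).1 hx
  have hit : (x, p1.getD x 0) ∈ p1.items := pv_mem_items_of_mem_keys p1 hn1 hk.1
  refine List.mem_map.2 ⟨(x, p1.getD x 0), List.mem_filter.2 ⟨hit, ?_⟩, rfl⟩
  rw [PySem.Set.contains_iff]; exact hx

lemma pv_bestA_get (p1 p2 : PySem.Dict String Int) (hn1 : p1.keys.Nodup) (hn2 : p2.keys.Nodup)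
    (c1 : Int) (hc1 : c1 ∈ (pvGroupA (pvCommon p1 p2) p1.items).keys) :
    (pvBestA (pvGroupA (pvCommon p1 p2) p1.items) (pvGroupA (pvCommon p1 p2) p2.items)).get? c1
      = some ((pvRef p1 p2 c1).2) := by
  set t1c := pvGroupA (pvCommon p1 p2) p1.items with ht1
  set t2c := pvGroupA (pvCommon p1 p2) p2.items with ht2
  have hkeys : (t1c.items.map (·.1)) = t1c.keys := rfl
  have hnd1 : (t1c.items.map (·.1)).Nodup := by rw [hkeys]; exact pv_nodup_keys_groupA _ _
  have hitems : (pvBestA t1c t2c).items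
      = t1c.items.map (fun q => (q.1, (pvBestInnerA q.2 t2c.items).2)) := by
    rw [pvBestA, PySem.Dict.items_foldl_insert_fresh _ _ _ _ (fun a _ => PySem.Dict.contains_empty _) hnd1]
    simp [show PySem.Dict.empty.items = ([] : List (Int × Option Int)) from rfl]
  have hndb : (pvBestA t1c t2c).keys.Nodup := by
    have : (pvBestA t1c t2c).keys = t1c.items.map (·.1) := by
      show (pvBestA t1c t2c).items.map (·.1) = _
      rw [hitems, List.map_map]; rfl
    rw [this]; exact hnd1
  have hmem : (c1, t1c.getD c1 PySem.Set.empty) ∈ t1c.items := by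
    rw [PySem.Dict.items_eq_map_keys _ (pv_nodup_keys_groupA _ _) PySem.Set.empty]
    exact List.mem_map.2 ⟨c1, hc1, rfl⟩
  have hmemb : (c1, (pvBestInnerA (t1c.getD c1 PySem.Set.empty) t2c.items).2) ∈ (pvBestA t1c t2c).items := by
    rw [hitems]
    exact List.mem_map.2 ⟨(c1, t1c.getD c1 PySem.Set.empty), hmem, rfl⟩
  rw [PySem.Dict.get?_eq_some_iff_mem_items _ _ _ hndb]
  rw [ht1, ht2] at hmemb ⊢
  rw [pv_groupA1_getD p1 p2 hn1, pv_innerA p1 p2 hn1 hn2] at hmemb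
  exact hmemb


-- A's inner scan over an ord-increasing candidate list computes the (count, first-occurrence) maximum
lemma pv_refChar (w : Int → Int) (ord : Int → Int) (l : List Int)
    (hpos : ∀ c ∈ l, 0 ≤ w c) (hord : l.Pairwise (fun a b => ord a < ord b)) :
    ((l.foldl (fun st c => if w c > st.1 then (w c, some c) else st) ((0 : Int), (none : Option Int)))
        = (0, none) ∧ ∀ c ∈ l, w c ≤ 0)
    ∨ ∃ m ∈ l, (l.foldl (fun st c => if w c > st.1 then (w c, some c) else st) ((0 : Int), (none : Option Int)))
        = (w m, some m) ∧ 0 < w m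
        ∧ ∀ c ∈ l, c ≠ m → (w c < w m ∨ (w c = w m ∧ ord m < ord c)) := by
  induction l using List.reverseRecOn with
  | nil => left; simp
  | append_singleton t x ih =>
    have hposT : ∀ c ∈ t, 0 ≤ w c := fun c hc => hpos c (by simp [hc])
    have hordT : t.Pairwise (fun a b => ord a < ord b) := (List.pairwise_append.1 hord).1
    have hordX : ∀ a ∈ t, ord a < ord x := by
      have h := (List.pairwise_append.1 hord).2.2
      intro a ha; exact h a ha x (by simp)
    rw [List.foldl_append]
    rcases ih hposT hordT with ⟨heq, hall⟩ | ⟨m, hm, heq, hwm, hdom⟩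
    · rw [heq]
      simp only [List.foldl_cons, List.foldl_nil]
      by_cases h : w x > 0
      · right
        refine ⟨x, by simp, by rw [if_pos h], h, ?_⟩
        intro c hc hne
        rcases List.mem_append.1 hc with hc | hc
        · exact Or.inl (lt_of_le_of_lt (hall c hc) h)
        · simp at hc; subst hc; exact absurd rfl hne
      · left
        refine ⟨by rw [if_neg h], ?_⟩
        intro c hc; rcases List.mem_append.1 hc with hc | hc
        · exact hall c hc
        · simp at hc; subst hc; omega
    · rw [heq]
      simp only [List.foldl_cons, List.foldl_nil]
      by_cases h : w x > w m
      · right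
        refine ⟨x, by simp, by rw [if_pos h], by omega, ?_⟩
        intro c hc hne
        rcases List.mem_append.1 hc with hc | hc
        · by_cases hcm : c = m
          · subst hcm; exact Or.inl h
          · rcases hdom c hc hcm with h1 | h1
            · exact Or.inl (by omega)
            · exact Or.inl (by omega)
        · simp at hc; subst hc; exact absurd rfl hne
      · right
        refine ⟨m, by simp [hm], by rw [if_neg h], hwm, ?_⟩
        intro c hc hne
        rcases List.mem_append.1 hc with hc | hc
        · exact hdom c hc hne
        · simp at hc; subst hc
          have hle : w c ≤ w m := by omega
          rcases lt_or_eq_of_le hle with h1 | h1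
          · exact Or.inl h1
          · exact Or.inr ⟨h1, hordX m hm⟩

lemma pv_idxOf_pairwise (l : List Int) (h : l.Nodup) :
    l.Pairwise (fun a b => (l.idxOf a : Int) < l.idxOf b) := by
  rw [List.pairwise_iff_getElem]
  intro i j hi hj hij
  rw [List.Nodup.idxOf_getElem h i hi, List.Nodup.idxOf_getElem h j hj]
  exact_mod_cast hij

-- B's single pass over the tallies, abstracted
def pvFoldB (w : Int × Int → Int) (ord : Int → Int) (L : List (Int × Int)) :
    PySem.Dict Int (Int × Int × Int) :=
  L.foldl (fun b k =>
    match b.get? k.1 with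
    | none => b.insert k.1 (w k, ord k.2, k.2)
    | some cur =>
      if w k > cur.1 ∨ (w k = cur.1 ∧ ord k.2 < cur.2.1) then b.insert k.1 (w k, ord k.2, k.2) else b)
    PySem.Dict.empty

lemma pv_bestChar (w : Int × Int → Int) (ord : Int → Int) (L : List (Int × Int))
    (hinj : ∀ p ∈ L, ∀ q ∈ L, p.1 = q.1 → ord p.2 = ord q.2 → p.2 = q.2) (c1 : Int) :
    ((pvFoldB w ord L).get? c1 = none ∧ ∀ p ∈ L, p.1 ≠ c1)
    ∨ ∃ m, (c1, m) ∈ L ∧ (pvFoldB w ord L).get? c1 = some (w (c1, m), ord m, m)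
        ∧ ∀ c2, (c1, c2) ∈ L → c2 ≠ m →
            (w (c1, c2) < w (c1, m) ∨ (w (c1, c2) = w (c1, m) ∧ ord m < ord c2)) := by
  induction L using List.reverseRecOn with
  | nil => left; exact ⟨PySem.Dict.get?_empty _, by simp⟩
  | append_singleton t x ih =>
    obtain ⟨a, b⟩ := x
    have hinjT : ∀ p ∈ t, ∀ q ∈ t, p.1 = q.1 → ord p.2 = ord q.2 → p.2 = q.2 := by
      intro p hp q hq; exact hinj p (by simp [hp]) q (by simp [hq])
    have hfold : pvFoldB w ord (t ++ [(a, b)])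
        = (match (pvFoldB w ord t).get? a with
          | none => (pvFoldB w ord t).insert a (w (a, b), ord b, b)
          | some cur =>
            if w (a, b) > cur.1 ∨ (w (a, b) = cur.1 ∧ ord b < cur.2.1)
            then (pvFoldB w ord t).insert a (w (a, b), ord b, b) else pvFoldB w ord t) := by
      simp only [pvFoldB, List.foldl_append, List.foldl_cons, List.foldl_nil]
    by_cases hx1 : a = c1
    · subst hx1
      rcases ih hinjT with ⟨hD, hnone⟩ | ⟨m, hmem, hD, hdom⟩
      · right
        refine ⟨b, by simp, ?_, ?_⟩
        · rw [hfold, hD]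
          simp [PySem.Dict.get?_insert_self]
        · intro c2 hc2 hne
          rcases List.mem_append.1 hc2 with hc | hc
          · exact absurd rfl (hnone _ hc)
          · have hcb : c2 = b := by simpa using hc
            exact absurd hcb hne
      · rw [hfold, hD]
        simp only []
        by_cases hcond : w (a, b) > w (a, m) ∨ (w (a, b) = w (a, m) ∧ ord b < ord m)
        · right
          refine ⟨b, by simp, by rw [if_pos hcond]; simp [PySem.Dict.get?_insert_self], ?_⟩
          intro c2 hc2 hne
          rcases List.mem_append.1 hc2 with hc | hc
          · by_cases hcm : c2 = m
            · subst hcm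
              rcases hcond with h1 | h1
              · exact Or.inl h1
              · exact Or.inr ⟨h1.1.symm, h1.2⟩
            · rcases hdom c2 hc hcm with h1 | h1
              · rcases hcond with h2 | h2
                · exact Or.inl (by omega)
                · exact Or.inl (by omega)
              · rcases hcond with h2 | h2
                · exact Or.inl (by omega)
                · exact Or.inr ⟨by omega, by omega⟩
          · have hcb : c2 = b := by simpa using hc
            exact absurd hcb hne
        · right
          refine ⟨m, by simp [hmem], by rw [if_neg hcond]; exact hD, ?_⟩
          intro c2 hc2 hne
          rcases List.mem_append.1 hc2 with hc | hc
          · exact hdom c2 hc hne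
          · have hcb : c2 = b := by simpa using hc
            subst hcb
            push_neg at hcond
            have hle : w (a, c2) ≤ w (a, m) := by omega
            rcases lt_or_eq_of_le hle with h1 | h1
            · exact Or.inl h1
            · refine Or.inr ⟨h1, ?_⟩
              have hor : ord m ≤ ord c2 := hcond.2 h1
              rcases lt_or_eq_of_le hor with h2 | h2
              · exact h2
              · exfalso
                have := hinj (a, m) (by simp [hmem]) (a, c2) (by simp) rfl (by simpa using h2)
                simp at this
                exact hne this.symm
    · have hpres : (pvFoldB w ord (t ++ [(a, b)])).get? c1 = (pvFoldB w ord t).get? c1 := by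
        rw [hfold]
        cases hD : (pvFoldB w ord t).get? a with
        | none =>
          simp only []
          exact PySem.Dict.get?_insert_of_ne _ _ (fun h => hx1 h.symm)
        | some cur =>
          simp only []
          split_ifs with hcond
          · exact PySem.Dict.get?_insert_of_ne _ _ (fun h => hx1 h.symm)
          · rfl
      rcases ih hinjT with ⟨hD, hnone⟩ | ⟨m, hmem, hD, hdom⟩
      · left
        refine ⟨by rw [hpres]; exact hD, ?_⟩
        intro p hp
        rcases List.mem_append.1 hp with hp | hp
        · exact hnone p hp
        · have : p = (a, b) := by simpa using hp
          subst this; exact hx1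
      · right
        refine ⟨m, by simp [hmem], by rw [hpres]; exact hD, ?_⟩
        intro c2 hc2 hne
        rcases List.mem_append.1 hc2 with hc | hc
        · exact hdom c2 hc hne
        · exfalso
          have : (c1, c2) = (a, b) := by simpa using hc
          exact hx1 (by simpa using (Prod.mk.injEq _ _ _ _ ▸ this : c1 = a ∧ c2 = b).1.symm)


lemma pv_len_fold {α : Type} (l : List α) (n : Int) :
    l.foldl (fun s _ => s + 1) n = n + l.length := by
  induction l generalizing n with
  | nil => simp
  | cons x t ih => simp [ih]; omega

lemma pv_map_fst_zipIdx {α : Type} (l : List α) (n : ℕ) :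
    ((l.zipIdx n).map (fun p => p.1)) = l := by
  induction l generalizing n with
  | nil => simp
  | cons x t ih => simp [List.zipIdx_cons, ih]

lemma pv_ordD_items (l : List Int) :
    (l.foldl (fun d x => d.setdefault x (d.size : Int)) PySem.Dict.empty).items
      = (PySem.Set.ofList l).zipIdx.map (fun p => (p.1, (p.2 : Int))) := by
  induction l using List.reverseRecOn with
  | nil => simp [PySem.Set.ofList]; rfl
  | append_singleton t x ih =>
    rw [List.foldl_append, List.foldl_cons, List.foldl_nil]
    set d := t.foldl (fun d x => d.setdefault x (d.size : Int)) PySem.Dict.empty with hd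
    have hkeys : d.keys = PySem.Set.ofList t := by
      show d.items.map (·.1) = _
      rw [ih, List.map_map]
      exact pv_map_fst_zipIdx _ _
    rw [PySem.Set.ofList_append_singleton]
    by_cases hx : x ∈ PySem.Set.ofList t
    · have hc : d.contains x = true := by
        rw [PySem.Dict.contains_iff_mem_keys, hkeys]; exact hx
      rw [PySem.Dict.setdefault_of_contains _ _ hc, PySem.Set.add_of_mem hx]
      exact ih
    · have hc : d.contains x = false := by
        rw [Bool.eq_false_iff]
        intro hcc
        exact hx (hkeys ▸ (PySem.Dict.contains_iff_mem_keys d x).1 hcc)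
      rw [PySem.Dict.setdefault_of_not_contains _ _ hc,
        PySem.Dict.items_insert_of_not_contains _ _ hc, ih, PySem.Set.add_of_not_mem hx,
        List.zipIdx_append, List.map_append]
      congr 1
      have hsz : d.size = (PySem.Set.ofList t).length := by
        show d.items.length = _
        rw [ih, List.length_map, List.length_zipIdx]
      simp [hsz]

lemma pv_ordD_getD (p1 p2 : PySem.Dict String Int) (c2 : Int) (hc : c2 ∈ pvT2K p1 p2) :
    (pvOrdD p1 p2).getD c2 0 = pvOrd p1 p2 c2 := by
  have hit := pv_ordD_items ((pvCP p1 p2).map (·.2))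
  have hitems : (pvOrdD p1 p2).items
      = (pvT2K p1 p2).zipIdx.map (fun p => (p.1, (p.2 : Int))) := hit
  have hnd : (pvOrdD p1 p2).keys.Nodup := by
    show ((pvOrdD p1 p2).items.map (·.1)).Nodup
    rw [hitems, List.map_map]
    rw [show ((fun (x : Int × Int) => x.1) ∘ (fun (p : Int × ℕ) => (p.1, (p.2 : Int))))
      = (fun (p : Int × ℕ) => p.1) from rfl, pv_map_fst_zipIdx]
    exact PySem.Set.nodup_ofList _
  have hlt : (pvT2K p1 p2).idxOf c2 < (pvT2K p1 p2).length := List.idxOf_lt_length_of_mem hc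
  have hmemz : (c2, (pvT2K p1 p2).idxOf c2) ∈ (pvT2K p1 p2).zipIdx := by
    rw [List.mem_zipIdx_iff_getElem?]
    simp only
    rw [List.getElem?_eq_getElem hlt, List.getElem_idxOf hlt]
  have hmem : (c2, ((pvT2K p1 p2).idxOf c2 : Int)) ∈ (pvOrdD p1 p2).items := by
    rw [hitems]
    exact List.mem_map.2 ⟨_, hmemz, rfl⟩
  rw [pvOrd]
  exact PySem.Dict.getD_of_mem_items _ hmem hnd 0

-- the single tally pass, split into its three independent components
lemma pv_tally (p1 p2 : PySem.Dict String Int) :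
    pvTallyB p1 p2.items
      = (PySem.Dict.counter (pvPairs p1 p2), pvOrdD p1 p2, ((pvCP p1 p2).length : Int)) := by
  rw [pvTallyB, ← List.foldl_filter
    (f := fun (st : PySem.Dict (Int × Int) Int × PySem.Dict Int Int × Int) (q : String × Int) =>
      (st.1.insert (p1.getD q.1 0, q.2) (st.1.getD (p1.getD q.1 0, q.2) 0 + 1),
       st.2.1.setdefault q.2 (st.2.1.size : Int),
       st.2.2 + 1))
    (p := fun q => p1.contains q.1)]
  rw [show p2.items.filter (fun q => p1.contains q.1) = pvCP p1 p2 from rfl]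
  rw [PySem.List.foldl_prod_mk
    (f := fun (d : PySem.Dict (Int × Int) Int) (q : String × Int) =>
      d.insert (p1.getD q.1 0, q.2) (d.getD (p1.getD q.1 0, q.2) 0 + 1))
    (g := fun (s : PySem.Dict Int Int × Int) (q : String × Int) =>
      (s.1.setdefault q.2 (s.1.size : Int), s.2 + 1))]
  rw [PySem.List.foldl_prod_mk
    (f := fun (d : PySem.Dict Int Int) (q : String × Int) => d.setdefault q.2 (d.size : Int))
    (g := fun (n : Int) (_ : String × Int) => n + 1)]
  refine congrArg₂ _ ?_ (congrArg₂ _ ?_ ?_)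
  · exact (List.foldl_map (f := fun (q : String × Int) => (p1.getD q.1 0, q.2))
      (g := fun (d : PySem.Dict (Int × Int) Int) (k : Int × Int) => d.insert k (d.getD k 0 + 1))
      (l := pvCP p1 p2) (init := PySem.Dict.empty)).symm.trans
      (PySem.Dict.foldl_insert_getD_add_one_eq_counter _)
  · exact (List.foldl_map (f := fun (q : String × Int) => q.2)
      (g := fun (d : PySem.Dict Int Int) (x : Int) => d.setdefault x (d.size : Int))
      (l := pvCP p1 p2) (init := PySem.Dict.empty)).symm
  · rw [pv_len_fold]; simp


lemma pv_pairs_map_snd (p1 p2 : PySem.Dict String Int) :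
    (pvPairs p1 p2).map (·.2) = (pvCP p1 p2).map (·.2) := by
  rw [pvPairs, List.map_map]; rfl

lemma pv_mem_t2K_of_mem_pairs (p1 p2 : PySem.Dict String Int) {k : Int × Int}
    (hk : k ∈ pvPairs p1 p2) : k.2 ∈ pvT2K p1 p2 := by
  rw [pvT2K, PySem.Set.mem_ofList, ← pv_pairs_map_snd]
  exact List.mem_map.2 ⟨k, hk, rfl⟩

lemma pv_ord_inj (p1 p2 : PySem.Dict String Int) {a b : Int}
    (ha : a ∈ pvT2K p1 p2) (hb : b ∈ pvT2K p1 p2) (h : pvOrd p1 p2 a = pvOrd p1 p2 b) :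
    a = b := by
  rw [pvOrd, pvOrd] at h
  have h' : (pvT2K p1 p2).idxOf a = (pvT2K p1 p2).idxOf b := by exact_mod_cast h
  have hla : (pvT2K p1 p2).idxOf a < (pvT2K p1 p2).length := List.idxOf_lt_length_of_mem ha
  have hlb : (pvT2K p1 p2).idxOf b < (pvT2K p1 p2).length := List.idxOf_lt_length_of_mem hb
  have e1 := List.getElem_idxOf hla
  have e2 := List.getElem_idxOf hlb
  simp only [h'] at e1
  exact e1.symm.trans e2

lemma pv_bestB_eq_foldB (p1 p2 : PySem.Dict String Int) :
    pvBestB (pvOrdD p1 p2) (PySem.Dict.counter (pvPairs p1 p2)).items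
      = pvFoldB (fun k => pvW p1 p2 k.1 k.2) (pvOrd p1 p2) (PySem.Set.ofList (pvPairs p1 p2)) := by
  rw [pvBestB, PySem.Dict.items_counter, List.foldl_map, pvFoldB]
  apply PySem.List.foldl_congr_mem
  intro b k hk
  have hk2 : k.2 ∈ pvT2K p1 p2 :=
    pv_mem_t2K_of_mem_pairs p1 p2 ((PySem.Set.mem_ofList _ _).1 hk)
  simp only [pv_ordD_getD p1 p2 k.2 hk2]
  have hw : ((pvPairs p1 p2).count k : Int) = pvW p1 p2 k.1 k.2 := by
    rw [pvW]
  rw [hw]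

lemma pv_pair_of_common (p1 p2 : PySem.Dict String Int) (hn2 : p2.keys.Nodup)
    {x : String} (hx : x ∈ pvCommon p1 p2) :
    (p1.getD x 0, p2.getD x 0) ∈ pvPairs p1 p2 := by
  have hk := (pv_mem_common p1 p2 x).1 hx
  have hit : (x, p2.getD x 0) ∈ p2.items := pv_mem_items_of_mem_keys p2 hn2 hk.2
  have hcp : (x, p2.getD x 0) ∈ pvCP p1 p2 := (pv_mem_cp p1 p2 _).2 ⟨hit, hk.1⟩
  exact List.mem_map.2 ⟨(x, p2.getD x 0), hcp, rfl⟩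

lemma pv_w_nonneg (p1 p2 : PySem.Dict String Int) (c1 c2 : Int) : 0 ≤ pvW p1 p2 c1 c2 := by
  rw [pvW]; exact_mod_cast Nat.zero_le _

lemma pv_w_pos_iff (p1 p2 : PySem.Dict String Int) (c1 c2 : Int) :
    0 < pvW p1 p2 c1 c2 ↔ (c1, c2) ∈ pvPairs p1 p2 := by
  rw [pvW]
  rw [show ((0 : Int) < ((pvPairs p1 p2).count (c1, c2) : Int)) ↔ 0 < (pvPairs p1 p2).count (c1, c2) from by exact_mod_cast Iff.rfl]
  exact List.count_pos_iff

-- B's per-community best tally agrees with the reference scan A performs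
lemma pv_best_match (p1 p2 : PySem.Dict String Int) (hn2 : p2.keys.Nodup)
    {x : String} (hx : x ∈ pvCommon p1 p2) :
    ∃ m : Int, (pvRef p1 p2 (p1.getD x 0)).2 = some m ∧
      (pvBestB (pvOrdD p1 p2) (PySem.Dict.counter (pvPairs p1 p2)).items).getD (p1.getD x 0) (0, 0, 0)
        = (pvW p1 p2 (p1.getD x 0) m, pvOrd p1 p2 m, m) := by
  have hpair := pv_pair_of_common p1 p2 hn2 hx
  set c1 := p1.getD x 0
  set c2n := p2.getD x 0
  have hinj : ∀ p ∈ PySem.Set.ofList (pvPairs p1 p2), ∀ q ∈ PySem.Set.ofList (pvPairs p1 p2),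
      p.1 = q.1 → pvOrd p1 p2 p.2 = pvOrd p1 p2 q.2 → p.2 = q.2 := by
    intro p hp q hq _ ho
    exact pv_ord_inj p1 p2 (pv_mem_t2K_of_mem_pairs p1 p2 ((PySem.Set.mem_ofList _ _).1 hp))
      (pv_mem_t2K_of_mem_pairs p1 p2 ((PySem.Set.mem_ofList _ _).1 hq)) ho
  rcases pv_bestChar (fun k => pvW p1 p2 k.1 k.2) (pvOrd p1 p2) (PySem.Set.ofList (pvPairs p1 p2)) hinj c1
    with ⟨_, hall⟩ | ⟨m, hmem, hsome, hdom⟩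
  · exact absurd rfl (hall (c1, c2n) ((PySem.Set.mem_ofList _ _).2 hpair))
  · have hrc := pv_refChar (fun c => pvW p1 p2 c1 c) (pvOrd p1 p2) (pvT2K p1 p2)
      (fun c _ => pv_w_nonneg p1 p2 c1 c)
      (by
        have := pv_idxOf_pairwise (pvT2K p1 p2) (PySem.Set.nodup_ofList _)
        exact this.imp (fun h => h))
    rcases hrc with ⟨_, hall'⟩ | ⟨m', hm', heq, hwm', hdom'⟩
    · exfalso
      have hc2K : c2n ∈ pvT2K p1 p2 := pv_mem_t2K_of_mem_pairs p1 p2 hpair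
      have h0 : pvW p1 p2 c1 c2n ≤ 0 := by simpa using hall' c2n hc2K
      have hpos : 0 < pvW p1 p2 c1 c2n := (pv_w_pos_iff p1 p2 c1 c2n).2 hpair
      omega
    · have hmm : m = m' := by
        by_cases hne : m = m'
        · exact hne
        · exfalso
          have hmK : m ∈ pvT2K p1 p2 :=
            pv_mem_t2K_of_mem_pairs p1 p2 ((PySem.Set.mem_ofList _ _).1 hmem)
          have h1 := hdom' m hmK hne
          have hm'mem : (c1, m') ∈ PySem.Set.ofList (pvPairs p1 p2) :=
            (PySem.Set.mem_ofList _ _).2 ((pv_w_pos_iff p1 p2 c1 m').1 hwm')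
          have h2 := hdom m' hm'mem (fun h => hne h.symm)
          have hoinj : pvOrd p1 p2 m = pvOrd p1 p2 m' → m = m' :=
            fun h => pv_ord_inj p1 p2 hmK hm' h
          rcases h1 with h1 | h1 <;> rcases h2 with h2 | h2 <;> simp only at h1 h2 <;> omega
      subst hmm
      refine ⟨m, congrArg Prod.snd (show pvRef p1 p2 c1 = (pvW p1 p2 c1 m, some m) from heq), ?_⟩
      rw [pv_bestB_eq_foldB, PySem.Dict.getD_eq_get?_getD, hsome]
      simp

-- counting loops
lemma pv_countA {α : Type} (l : List α) (P : α → Prop) [DecidablePred P] (u c : Int) :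
    l.foldl (fun uc x => if P x then (uc.1 + 1, uc.2) else (uc.1, uc.2 + 1)) (u, c)
      = (u + (l.countP (fun x => decide (P x)) : Int),
         c + ((l.length : Int) - (l.countP (fun x => decide (P x)) : Int))) := by
  induction l generalizing u c with
  | nil => simp
  | cons x t ih =>
    rw [List.foldl_cons]
    by_cases h : P x
    · rw [if_pos h, ih]
      simp [List.countP_cons, h]
      omega
    · rw [if_neg h, ih]
      simp [List.countP_cons, h]
      omega

lemma pv_countB {α : Type} (l : List α) (P : α → Prop) [DecidablePred P] (u : Int) :
    l.foldl (fun u x => if P x then u + 1 else u) u = u + (l.countP (fun x => decide (P x)) : Int) := by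
  induction l generalizing u with
  | nil => simp
  | cons x t ih =>
    rw [List.foldl_cons]
    by_cases h : P x
    · rw [if_pos h, ih]
      simp [List.countP_cons, h]
      omega
    · rw [if_neg h, ih]
      simp [List.countP_cons, h]

-- the node predicate both programs count
def pvGoodB (p1 p2 : PySem.Dict String Int) (x : String) : Bool :=
  (pvRef p1 p2 (p1.getD x 0)).2 == some (p2.getD x 0)

theorem compute_node_stability_py_spec : Claim_equal_compute_node_stability_py := by
  intro xs ys m1 m2 _
  unfold Spec_compute_node_stability_py
  simp only [compute_node_stability_py, compute_node_stability_py_alt]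
  set p1 := PySem.Dict.ofList xs with hp1
  set p2 := PySem.Dict.ofList ys with hp2
  have hn1 : p1.keys.Nodup := PySem.Dict.nodup_keys_ofList xs
  have hn2 : p2.keys.Nodup := PySem.Dict.nodup_keys_ofList ys
  rw [show PySem.Set.inter (PySem.Set.ofList p1.keys) (PySem.Set.ofList p2.keys) = pvCommon p1 p2 from rfl]
  rw [pv_tally p1 p2]
  simp only
  have hciff : (pvCommon p1 p2).isEmpty = true ↔ ((pvCP p1 p2).length : Int) = 0 := by
    rw [List.isEmpty_iff, pv_common_nil_iff p1 p2 hn2]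
    constructor
    · intro h; rw [h]; simp
    · intro h
      have : (pvCP p1 p2).length = 0 := by exact_mod_cast h
      exact List.eq_nil_of_length_eq_zero this
  by_cases hc : (pvCommon p1 p2).isEmpty = true
  · rw [if_pos hc, if_pos (hciff.1 hc)]
  · rw [if_neg hc, if_neg (fun h => hc (hciff.2 h))]
    -- A's counting loop
    rw [pv_countA (pvCommon p1 p2)
      (fun node => ((pvBestA (pvGroupA (pvCommon p1 p2) p1.items) (pvGroupA (pvCommon p1 p2) p2.items)).get?
        (p1.getD node 0)).getD none = some (p2.getD node 0)) 0 0]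
    -- B's counting loop
    rw [pv_countB p2.items
      (fun q => p1.contains q.1 = true ∧
        ((pvBestB (pvOrdD p1 p2) (PySem.Dict.counter (pvPairs p1 p2)).items).getD (p1.getD q.1 0) (0, 0, 0)).2.2 = q.2) 0]
    -- both counts equal the count of pvGood over the common nodes
    have hA : (pvCommon p1 p2).countP (fun node => decide
        (((pvBestA (pvGroupA (pvCommon p1 p2) p1.items) (pvGroupA (pvCommon p1 p2) p2.items)).get?
          (p1.getD node 0)).getD none = some (p2.getD node 0)))
        = (pvCommon p1 p2).countP (fun x => pvGoodB p1 p2 x) := by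
      apply List.countP_congr
      intro x hx
      simp only [decide_eq_true_eq, pvGoodB, beq_iff_eq]
      rw [pv_bestA_get p1 p2 hn1 hn2 _ (pv_t1key_of_common p1 p2 hn1 hx)]
      rw [Option.getD_some]
    have hB : p2.items.countP (fun q => decide
        (p1.contains q.1 = true ∧
          ((pvBestB (pvOrdD p1 p2) (PySem.Dict.counter (pvPairs p1 p2)).items).getD (p1.getD q.1 0) (0, 0, 0)).2.2 = q.2))
        = (pvCommon p1 p2).countP (fun x => pvGoodB p1 p2 x) := by
      have hstep : p2.items.countP (fun q => decide
          (p1.contains q.1 = true ∧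
            ((pvBestB (pvOrdD p1 p2) (PySem.Dict.counter (pvPairs p1 p2)).items).getD (p1.getD q.1 0) (0, 0, 0)).2.2 = q.2))
          = (pvCP p1 p2).countP (fun q => decide
            (((pvBestB (pvOrdD p1 p2) (PySem.Dict.counter (pvPairs p1 p2)).items).getD (p1.getD q.1 0) (0, 0, 0)).2.2 = q.2)) := by
        rw [pvCP, List.countP_filter]
        apply List.countP_congr
        intro q hq
        simp only [Bool.and_eq_true, decide_eq_true_eq]
        constructor
        · rintro ⟨h1, h2⟩; exact ⟨h2, h1⟩
        · rintro ⟨h2, h1⟩; exact ⟨h1, h2⟩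
      rw [hstep]
      have hmid : (pvCP p1 p2).countP (fun q => decide
          (((pvBestB (pvOrdD p1 p2) (PySem.Dict.counter (pvPairs p1 p2)).items).getD (p1.getD q.1 0) (0, 0, 0)).2.2 = q.2))
          = (pvCP p1 p2).countP (fun q => pvGoodB p1 p2 q.1) := by
        apply List.countP_congr
        intro q hq
        have hxc : q.1 ∈ pvCommon p1 p2 :=
          (pv_mem_cp_nodes p1 p2 q.1).1 (List.mem_map.2 ⟨q, hq, rfl⟩)
        rcases pv_best_match p1 p2 hn2 hxc with ⟨m, href, hbest⟩
        have hq2 : q.2 = p2.getD q.1 0 :=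
          pv_snd_of_mem_items p2 hn2 ((pv_mem_cp p1 p2 q).1 hq).1
        simp only [decide_eq_true_eq, pvGoodB, beq_iff_eq]
        rw [hbest, href]
        simp only [Option.some_inj]
        constructor <;> intro h <;> omega
      rw [hmid]
      have hperm := pv_perm_common_cp p1 p2 hn2
      rw [hperm.countP_eq (fun x => pvGoodB p1 p2 x), List.countP_map]
      rfl
    have hlen : ((pvCommon p1 p2).length : Int) = ((pvCP p1 p2).length : Int) := by
      have := (pv_perm_common_cp p1 p2 hn2).length_eq
      rw [this, List.length_map]
    rw [hA, hB, hlen]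
    simp
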